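-- pv_equiv track=rewrite | github.com/NAlfassal/smart_chatbot | scripts/clean_flat_json.py | to_by_source
-- ===== SOURCE A (Python) =====
-- from typing import Dict, Tuple
--
-- def to_by_source(flat: Dict[str, str]) -> Dict[str, Dict[str, str]]:
--     by_source: Dict[str, Dict[str, str]] = {}
--     for k, v in flat.items():
--         if "||" in k:
--             src, art = k.split("||", 1)
--         else:
--             src, art = "_unknown", k
--         by_source.setdefault(src, {})
--         by_source[src][art] = v
--     return by_source
-- ===== SOURCE B (Python) =====
-- def to_by_source(flat):
--     def split_key(k):
--         if "||" in k:
--             s, a = k.split("||", 1)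
--             return s, a
--         return "_unknown", k
--
--     triples = [(*split_key(k), v) for k, v in flat.items()]
--     sources = list(dict.fromkeys(s for s, _, _ in triples))
--     return {s: {a: v for s2, a, v in triples if s2 == s} for s in sources}
-- ===== Notes on version B (the rewrite author's own statement) =====
-- stated objective: alternative
-- what changed: Replaces the single-pass setdefault accumulation into nested dicts with a grouped two-phase build: first materialise (source, article, value) triples, dedup the sources in first-appearance order, then build each source's inner dict in one comprehension over the triples filtered to that source.
import Mathlib
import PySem

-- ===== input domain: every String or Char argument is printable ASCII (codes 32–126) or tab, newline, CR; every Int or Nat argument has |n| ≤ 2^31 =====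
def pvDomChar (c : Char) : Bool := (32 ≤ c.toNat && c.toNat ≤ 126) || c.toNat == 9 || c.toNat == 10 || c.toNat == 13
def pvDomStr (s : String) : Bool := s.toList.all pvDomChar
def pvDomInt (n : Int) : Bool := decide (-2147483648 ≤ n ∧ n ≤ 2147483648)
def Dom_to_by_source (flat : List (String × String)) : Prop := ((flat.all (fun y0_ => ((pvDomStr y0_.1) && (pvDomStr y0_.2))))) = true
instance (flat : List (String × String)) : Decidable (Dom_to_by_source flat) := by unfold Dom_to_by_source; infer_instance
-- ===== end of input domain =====

-- B replaces A's single-pass setdefault accumulation with a grouped two-phase build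
-- (triples, dedup'd sources, one filtered pass per source); same cost class, alternative shape.


-- ===== PORT A =====
-- shared helper: src/art of a key — '"||" in k' then 'k.split("||", 1)' else ('_unknown', k);
-- the fallback arm of the match is unreachable ("||" in k guarantees two pieces).
def pvSrcArt (k : String) : String × String :=
  if PySem.Str.isIn "||" k then
    match PySem.Str.splitMax? k "||" 1 with
    | some (s :: a :: _) => (s, a)
    | _ => ("_unknown", k)
  else ("_unknown", k)

-- loop body of A: by_source.setdefault(src, {}); by_source[src][art] = v
def pvStepA (d : PySem.Dict String (PySem.Dict String String)) (kv : String × String) :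
    PySem.Dict String (PySem.Dict String String) :=
  let sa := pvSrcArt kv.1
  let d1 := d.setdefault sa.1 PySem.Dict.empty
  d1.insert sa.1 ((d1.getD sa.1 PySem.Dict.empty).insert sa.2 kv.2)

def to_by_source (flat : List (String × String)) : List (String × List (String × String)) :=
  ((flat.foldl pvStepA PySem.Dict.empty).items).map (fun p => (p.1, p.2.items))

-- ===== PORT B =====
-- triple (src, art, v) for one item, as built by B's comprehension
def pvTrip (kv : String × String) : String × String × String :=
  let sa := pvSrcArt kv.1
  (sa.1, sa.2, kv.2)

def to_by_source_alt (flat : List (String × String)) : List (String × List (String × String)) :=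
  let triples := flat.map pvTrip
  let sources := PySem.List.dedup (triples.map (fun t => t.1))
  sources.map (fun s =>
    (s, (PySem.Dict.ofList ((triples.filter (fun t => t.1 == s)).map (fun t => (t.2.1, t.2.2)))).items))

-- ===== PRECONDITION & SPEC =====
def Spec_to_by_source (flat : List (String × String)) (out : List (String × List (String × String))) : Prop := out = to_by_source_alt flat
instance (flat : List (String × String)) (out : List (String × List (String × String))) : Decidable (Spec_to_by_source flat out) := by unfold Spec_to_by_source; infer_instance

-- ===== CLAIM (what is proved, stated in full; the proofs are below) =====
def Claim_equal_to_by_source : Prop := ∀ (flat : List (String × String)), Dom_to_by_source flat → Spec_to_by_source flat (to_by_source flat)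

-- ===== LEMMAS AND PROOFS =====

-- proof-only abbreviations for the two components of B's result
def pvSrcs (xs : List (String × String)) : List String :=
  (xs.map pvTrip).map (fun t => t.1)

def pvInner (xs : List (String × String)) (s : String) : PySem.Dict String String :=
  PySem.Dict.ofList (((xs.map pvTrip).filter (fun t => t.1 == s)).map (fun t => (t.2.1, t.2.2)))

theorem pv_ofList_append {l : List (String × String)} (x : String × String) :
    PySem.Dict.ofList (l ++ [x]) = (PySem.Dict.ofList l).insert x.1 x.2 := by
  simp [PySem.Dict.ofList, PySem.Dict.update, List.foldl_append]

theorem pv_inner_append_self (xs : List (String × String)) (kv : String × String) :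
    pvInner (xs ++ [kv]) (pvTrip kv).1
      = (pvInner xs (pvTrip kv).1).insert (pvTrip kv).2.1 (pvTrip kv).2.2 := by
  simp [pvInner, List.filter_append, pv_ofList_append]

theorem pv_inner_append_ne (xs : List (String × String)) (kv : String × String) (t : String)
    (h : t ≠ (pvTrip kv).1) : pvInner (xs ++ [kv]) t = pvInner xs t := by
  have hb : ((pvTrip kv).1 == t) = false := beq_eq_false_iff_ne.mpr (Ne.symm h)
  simp [pvInner, List.filter_append, hb]

theorem pv_inner_of_not_mem (xs : List (String × String)) (kv : String × String)
    (h : (pvTrip kv).1 ∉ pvSrcs xs) :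
    pvInner (xs ++ [kv]) (pvTrip kv).1
      = PySem.Dict.empty.insert (pvTrip kv).2.1 (pvTrip kv).2.2 := by
  rw [pv_inner_append_self]
  have hfil : (xs.map pvTrip).filter (fun t => t.1 == (pvTrip kv).1) = [] := by
    apply List.filter_eq_nil_iff.mpr
    intro t ht
    have hmem : t.1 ∈ pvSrcs xs := List.mem_map.mpr ⟨t, ht, rfl⟩
    intro heq
    exact h (eq_of_beq heq ▸ hmem)
  simp [pvInner, hfil, PySem.Dict.ofList, PySem.Dict.update]

-- unfolding of one loop iteration of A, written over pvTrip's components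
theorem pvStepA_eq (d : PySem.Dict String (PySem.Dict String String)) (kv : String × String) :
    pvStepA d kv
      = (d.setdefault (pvTrip kv).1 PySem.Dict.empty).insert (pvTrip kv).1
          (((d.setdefault (pvTrip kv).1 PySem.Dict.empty).getD (pvTrip kv).1
              PySem.Dict.empty).insert (pvTrip kv).2.1 (pvTrip kv).2.2) := rfl

-- loop invariant: A's accumulated dict-of-dicts, as an items list, IS B's grouped result
theorem pv_inv (xs : List (String × String)) :
    (xs.foldl pvStepA PySem.Dict.empty).items
      = (PySem.List.dedup (pvSrcs xs)).map (fun s => (s, pvInner xs s)) := by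
  induction xs using List.reverseRecOn with
  | nil => rfl
  | append_singleton xs kv ih =>
    rw [List.foldl_append, List.foldl_cons, List.foldl_nil, pvStepA_eq]
    set d := xs.foldl pvStepA PySem.Dict.empty with hd
    have hkeys : d.keys = PySem.List.dedup (pvSrcs xs) := by
      show d.items.map Prod.fst = _
      rw [ih, List.map_map]; simp [Function.comp_def]
    have hnd : d.keys.Nodup := by rw [hkeys]; exact PySem.List.nodup_dedup _
    have hsrcs : pvSrcs (xs ++ [kv]) = pvSrcs xs ++ [(pvTrip kv).1] := by simp [pvSrcs]
    by_cases hmem : (pvTrip kv).1 ∈ PySem.List.dedup (pvSrcs xs)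
    · have hcont : d.contains (pvTrip kv).1 = true :=
        (PySem.Dict.contains_iff_mem_keys d _).mpr (hkeys ▸ hmem)
      have hget : d.getD (pvTrip kv).1 PySem.Dict.empty = pvInner xs (pvTrip kv).1 :=
        PySem.Dict.getD_of_mem_items d
          (by rw [ih]; exact List.mem_map.mpr ⟨_, hmem, rfl⟩) hnd _
      rw [PySem.Dict.setdefault_of_contains d _ hcont, hget,
        PySem.Dict.items_insert_of_contains d _ hcont, ih, hsrcs]
      have hsm : (pvTrip kv).1 ∈ pvSrcs xs := (PySem.List.mem_dedup _ _).mp hmem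
      have hded : PySem.List.dedup (pvSrcs xs ++ [(pvTrip kv).1])
          = PySem.List.dedup (pvSrcs xs) := by
        rw [PySem.List.dedup_eq_ofList, PySem.List.dedup_eq_ofList,
          PySem.Set.ofList_append_singleton]
        exact PySem.Set.add_of_mem ((PySem.Set.mem_ofList _ _).mpr hsm)
      rw [hded, List.map_map]
      apply List.map_congr_left
      intro t ht
      by_cases hts : t = (pvTrip kv).1
      · subst hts
        simp [pv_inner_append_self]
      · simp [pv_inner_append_ne xs kv t hts, hts]
    · have hsm : (pvTrip kv).1 ∉ pvSrcs xs :=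
        fun hh => hmem ((PySem.List.mem_dedup _ _).mpr hh)
      have hcont : d.contains (pvTrip kv).1 = false := by
        cases h : d.contains (pvTrip kv).1
        · rfl
        · exact absurd (hkeys ▸ (PySem.Dict.contains_iff_mem_keys d _).mp h) hmem
      rw [PySem.Dict.setdefault_of_not_contains d _ hcont, PySem.Dict.getD_insert_self,
        PySem.Dict.insert_insert_self, PySem.Dict.items_insert_of_not_contains d _ hcont,
        ih, hsrcs]
      have hded : PySem.List.dedup (pvSrcs xs ++ [(pvTrip kv).1])
          = PySem.List.dedup (pvSrcs xs) ++ [(pvTrip kv).1] := by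
        rw [PySem.List.dedup_eq_ofList, PySem.List.dedup_eq_ofList,
          PySem.Set.ofList_append_singleton]
        exact PySem.Set.add_of_not_mem (fun hh => hsm ((PySem.Set.mem_ofList _ _).mp hh))
      rw [hded, List.map_append]
      congr 1
      · apply List.map_congr_left
        intro t ht
        have hts : t ≠ (pvTrip kv).1 := fun hh => hmem (hh ▸ ht)
        simp [pv_inner_append_ne xs kv t hts]
      · simp [pv_inner_of_not_mem xs kv hsm]

-- ===== VERDICT (by name: the statement is the Claim_ definition above) =====
theorem to_by_source_spec : Claim_equal_to_by_source := by
  unfold Claim_equal_to_by_source Spec_to_by_source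
  intro flat _
  show to_by_source flat = to_by_source_alt flat
  simp only [to_by_source, to_by_source_alt, pv_inv, List.map_map, pvSrcs, pvInner,
    Function.comp_def]
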